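-- pv_equiv track=rewrite | github.com/SpacetimeCadet/706_NetworkSim | dictionary.py | node_string
-- ===== SOURCE A (Python) =====
-- def node_string(graph):
--     keys = {}
--     values = []
--
--     for k, v in graph.items():
--         str1 = str(k)
--         keys[str1] = {}
--         values.append(v)
--
--     klist = []
--     vlist = []
--     for i in values:
--         key_list = list(i)
--         list_string = map(str, key_list)
--         val_list = list(i.values())
--         klist.append(list(list_string))
--         vlist.append(val_list)
--
--     res = []
--     for i in range(len(klist)):
--         l1 = klist[i]
--         l2 = vlist[i]
--         res_dict = dict(zip(l1,l2))
--         res.append(res_dict)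
--
--     d = {}
--     for k, v in keys.items():
--         index = list(keys.keys()).index(k)
--         d[k] = res[index]
--
--     return d
-- ===== SOURCE B (Python) =====
-- def node_string(graph):
--     return {str(k): {str(ik): iv for ik, iv in v.items()} for k, v in graph.items()}
-- ===== Notes on version B (the rewrite author's own statement) =====
-- stated objective: faster
-- what changed: Replaces A's four sequential passes (a keys dict with dummy values, parallel klist/vlist lists, a zip pass, and a rebuild that locates each key with list(keys.keys()).index(k), which is quadratic) by one nested dict comprehension over graph.items().
import Mathlib
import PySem

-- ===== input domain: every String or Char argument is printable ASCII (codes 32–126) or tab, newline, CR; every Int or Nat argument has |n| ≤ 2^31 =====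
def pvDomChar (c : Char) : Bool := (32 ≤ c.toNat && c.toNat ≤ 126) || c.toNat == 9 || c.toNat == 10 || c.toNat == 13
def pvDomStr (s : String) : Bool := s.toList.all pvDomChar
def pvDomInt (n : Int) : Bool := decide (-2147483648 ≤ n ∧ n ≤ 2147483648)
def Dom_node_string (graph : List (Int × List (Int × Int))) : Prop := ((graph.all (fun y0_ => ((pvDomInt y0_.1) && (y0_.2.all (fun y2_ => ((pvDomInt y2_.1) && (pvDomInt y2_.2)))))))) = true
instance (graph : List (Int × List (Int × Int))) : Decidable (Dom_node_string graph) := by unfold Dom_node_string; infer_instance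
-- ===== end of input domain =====

-- B replaces A's four passes (keys dict, parallel klist/vlist, zip pass, rebuild via the
-- quadratic list(keys.keys()).index(k)) by one nested dict comprehension; measured faster.

-- ===== PORT A =====
def node_string (graph : List (Int × List (Int × Int))) : List (String × List (String × Int)) :=
  -- for k, v in graph.items(): keys[str(k)] = {}; values.append(v)
  let p1 := graph.foldl
    (fun (s : PySem.Dict String (PySem.Dict String Int) × List (List (Int × Int))) kv =>
      (s.1.insert (PySem.Int.toStr kv.1) PySem.Dict.empty, s.2 ++ [kv.2]))
    (PySem.Dict.empty, [])
  let keys := p1.1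
  let values := p1.2
  -- for i in values: klist.append(list(map(str, list(i)))); vlist.append(list(i.values()))
  let p2 := values.foldl
    (fun (s : List (List String) × List (List Int)) i =>
      (s.1 ++ [(i.map Prod.fst).map PySem.Int.toStr], s.2 ++ [i.map Prod.snd]))
    ([], [])
  let klist := p2.1
  let vlist := p2.2
  -- for i in range(len(klist)): res.append(dict(zip(klist[i], vlist[i])))
  let res := (PySem.List.pyRange 0 (PySem.List.len klist) 1).foldl
    (fun (r : List (PySem.Dict String Int)) i =>
      r ++ [PySem.Dict.ofList ((PySem.List.pyGetD klist i []).zip (PySem.List.pyGetD vlist i []))])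
    []
  -- for k, v in keys.items(): d[k] = res[list(keys.keys()).index(k)]
  let d := keys.items.foldl
    (fun (d : PySem.Dict String (PySem.Dict String Int)) kv =>
      d.insert kv.1
        (PySem.List.pyGetD res (((PySem.List.index? keys.keys kv.1).getD 0 : Nat) : Int) PySem.Dict.empty))
    PySem.Dict.empty
  d.items.map (fun kv => (kv.1, kv.2.items))

-- ===== PORT B =====
def node_string_alt (graph : List (Int × List (Int × Int))) : List (String × List (String × Int)) :=
  ((graph.foldl
      (fun (d : PySem.Dict String (PySem.Dict String Int)) kv =>
        d.insert (PySem.Int.toStr kv.1)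
          (PySem.Dict.ofList (kv.2.map (fun p => (PySem.Int.toStr p.1, p.2)))))
      PySem.Dict.empty).items).map (fun kv => (kv.1, kv.2.items))

-- ===== PRECONDITION & SPEC =====
-- Pre_ excludes association lists whose outer keys stringify equal (with Int keys: duplicate
-- outer keys); such lists do not encode any Python dict — dict() collapses duplicates — so A is
-- never run on them.
def Pre_node_string (graph : List (Int × List (Int × Int))) : Prop :=
  (graph.map (fun p => PySem.Int.toStr p.1)).Nodup
instance (graph : List (Int × List (Int × Int))) : Decidable (Pre_node_string graph) := by
  unfold Pre_node_string; infer_instance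
def pvWitness_node_string : (List (Int × List (Int × Int))) := [(1, [(2, 3), (5, 6)]), (-7, []), (8, [(0, 0)])]
def Spec_node_string (graph : List (Int × List (Int × Int))) (out : List (String × List (String × Int))) : Prop := out = node_string_alt graph
instance (graph : List (Int × List (Int × Int))) (out : List (String × List (String × Int))) : Decidable (Spec_node_string graph out) := by unfold Spec_node_string; infer_instance

-- ===== CLAIM (what is proved, stated in full; the proofs are below) =====
def Claim_equal_node_string : Prop := ∀ (graph : List (Int × List (Int × Int))), Dom_node_string graph → Pre_node_string graph → Spec_node_string graph (node_string graph)

-- ===== LEMMAS AND PROOFS =====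
theorem pvFoldPair1 {γ α δ : Type} (l : List γ) (F : α → γ → α) (G : γ → δ)
    (a0 : α) (b0 : List δ) :
    l.foldl (fun s x => (F s.1 x, s.2 ++ [G x])) (a0, b0) = (l.foldl F a0, b0 ++ l.map G) := by
  induction l generalizing a0 b0 with
  | nil => simp
  | cons x xs ih => simp [ih]

theorem pvFoldPair2 {γ δ ε : Type} (l : List γ) (G1 : γ → δ) (G2 : γ → ε)
    (b0 : List δ) (c0 : List ε) :
    l.foldl (fun s x => (s.1 ++ [G1 x], s.2 ++ [G2 x])) (b0, c0) = (b0 ++ l.map G1, c0 ++ l.map G2) := by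
  induction l generalizing b0 c0 with
  | nil => simp
  | cons x xs ih => simp [ih]

theorem pvIndexNodup {α : Type} [BEq α] [LawfulBEq α] {l : List α} (h : l.Nodup)
    (j : Nat) (hj : j < l.length) : PySem.List.index? l l[j] = some j := by
  rw [PySem.List.index?_eq_some_iff]
  refine ⟨l.take j, l.drop (j + 1), ?_, ?_, ?_⟩
  · conv_lhs => rw [← List.take_append_drop j l]
    rw [← List.getElem_cons_drop]
  · simp [Nat.min_eq_left (le_of_lt hj)]
  · intro hmem
    obtain ⟨i, hi, hE⟩ := List.getElem_of_mem hmem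
    have hil : i < j := by simp at hi; exact hi.1
    rw [List.getElem_take] at hE
    exact absurd ((List.Nodup.getElem_inj_iff h).mp hE) (by omega)

theorem pvResChar (values : List (List (Int × Int))) :
    (PySem.List.pyRange 0 (PySem.List.len (values.map (fun i => (i.map Prod.fst).map PySem.Int.toStr))) 1).foldl
      (fun r i => r ++ [PySem.Dict.ofList ((PySem.List.pyGetD (values.map (fun i => (i.map Prod.fst).map PySem.Int.toStr)) i []).zip
          (PySem.List.pyGetD (values.map (fun i => i.map Prod.snd)) i []))]) []
    = values.map (fun i => PySem.Dict.ofList (i.map (fun p => (PySem.Int.toStr p.1, p.2)))) := by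
  rw [PySem.List.foldl_append_singleton_eq_map]
  rw [List.nil_append]
  apply List.ext_getElem
  · simp [PySem.List.len, PySem.List.length_pyRange_one]
  · intro j h1 h2
    simp only [List.getElem_map]
    rw [PySem.List.getElem_pyRange_one]
    have hj : j < values.length := by
      simpa [PySem.List.len, PySem.List.length_pyRange_one] using h1
    rw [zero_add, PySem.List.pyGetD_natCast, PySem.List.pyGetD_natCast]
    rw [List.getD_eq_getElem _ _ (by simpa using hj), List.getD_eq_getElem _ _ (by simpa using hj)]
    simp only [List.getElem_map]
    rw [List.map_map, List.zip_map']
    rfl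

theorem node_string_spec : Claim_equal_node_string := by
  intro graph _ hpre
  unfold Spec_node_string
  have hnd : (graph.map (fun kv => PySem.Int.toStr kv.1)).Nodup := hpre
  -- B
  have hB : node_string_alt graph =
      graph.map (fun kv => (PySem.Int.toStr kv.1,
        (PySem.Dict.ofList (kv.2.map (fun p => (PySem.Int.toStr p.1, p.2)))).items)) := by
    unfold node_string_alt
    rw [PySem.Dict.items_foldl_insert_fresh graph (fun kv => PySem.Int.toStr kv.1)
      (fun kv => PySem.Dict.ofList (kv.2.map (fun p => (PySem.Int.toStr p.1, p.2))))
      PySem.Dict.empty (fun a _ => PySem.Dict.contains_empty _) hnd]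
    simp [List.map_map, PySem.Dict.empty, Function.comp]
  rw [hB]
  simp only [node_string]
  rw [pvFoldPair1 graph (fun d kv => d.insert (PySem.Int.toStr kv.1) PySem.Dict.empty) (fun kv => kv.2) PySem.Dict.empty []]
  simp only [List.nil_append]
  rw [pvFoldPair2 (graph.map (fun kv => kv.2)) (fun i => (i.map Prod.fst).map PySem.Int.toStr) (fun i => i.map Prod.snd) [] []]
  simp only [List.nil_append]
  rw [pvResChar (graph.map (fun kv => kv.2))]
  have hkitems : (List.foldl (fun (d : PySem.Dict String (PySem.Dict String Int)) kv => d.insert (PySem.Int.toStr kv.1) PySem.Dict.empty) PySem.Dict.empty graph).items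
      = graph.map (fun kv => (PySem.Int.toStr kv.1, (PySem.Dict.empty : PySem.Dict String Int))) := by
    simpa using PySem.Dict.items_foldl_insert_fresh graph (fun kv => PySem.Int.toStr kv.1)
      (fun _ => PySem.Dict.empty) PySem.Dict.empty (fun a _ => PySem.Dict.contains_empty _) hnd
  have hkkeys : (List.foldl (fun (d : PySem.Dict String (PySem.Dict String Int)) kv => d.insert (PySem.Int.toStr kv.1) PySem.Dict.empty) PySem.Dict.empty graph).keys
      = graph.map (fun kv => PySem.Int.toStr kv.1) := by
    simp only [PySem.Dict.keys, hkitems, List.map_map]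
    simp [Function.comp]
  rw [hkkeys, hkitems]
  have hfresh2 : ∀ a ∈ graph.map (fun kv => (PySem.Int.toStr kv.1, (PySem.Dict.empty : PySem.Dict String Int))),
      (PySem.Dict.empty : PySem.Dict String (PySem.Dict String Int)).contains a.1 = false :=
    fun a _ => PySem.Dict.contains_empty _
  have hnod2 : ((graph.map (fun kv => (PySem.Int.toStr kv.1, (PySem.Dict.empty : PySem.Dict String Int)))).map (fun a => a.1)).Nodup := by
    simpa [List.map_map, Function.comp] using hnd
  rw [PySem.Dict.items_foldl_insert_fresh _ _ _ _ hfresh2 hnod2]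
  have hemp : (PySem.Dict.empty : PySem.Dict String (PySem.Dict String Int)).items = [] := rfl
  rw [hemp, List.nil_append]
  simp only [List.map_map]
  apply List.ext_getElem
  · simp
  · intro j h1 h2
    have hj : j < graph.length := by simpa using h1
    simp only [List.getElem_map, Function.comp]
    have hsk : PySem.Int.toStr (graph[j]'hj).1 = (graph.map (fun kv => PySem.Int.toStr kv.1))[j]'(by simpa using hj) := by simp
    rw [hsk, pvIndexNodup hnd j (by simpa using hj)]
    rw [Option.getD_some, PySem.List.pyGetD_natCast]
    rw [List.getD_eq_getElem _ _ (by simpa using hj)]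
    simp
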